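-- pv_equiv track=rewrite | github.com/zinengtang/cs265-tasks | task3/licm.py | find_dominators
-- ===== SOURCE A (Python) =====
-- def find_dominators(cfg, entry):
--     dom = {v: set(cfg.keys()) for v in cfg}
--     dom[entry] = {entry}
--
--     changed = True
--     while changed:
--         changed = False
--         for node in cfg:
--             if node == entry:
--                 continue
--             preds = [p for p in cfg if node in cfg[p]]
--             if not preds:
--                 continue
--             new_dom = {node} | set.intersection(*(dom[p] for p in preds))
--             if new_dom != dom[node]:
--                 dom[node] = new_dom
--                 changed = True
--
--     return dom
-- ===== SOURCE B (Python) =====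
-- def find_dominators(cfg, entry):
--     # Dominators by node removal: v dominates u iff u cannot be reached from
--     # entry once v is deleted from the graph (no dataflow fixpoint at all).
--     nodes = list(cfg)
--
--     def reach(avoid):
--         # nodes reachable from entry without ever touching `avoid`
--         seen = {entry} - {avoid}
--         while True:
--             new = {s for p in seen if p in cfg for s in cfg[p]
--                    if s != avoid and s not in seen}
--             if not new:
--                 return seen
--             seen |= new
--
--     dom = {u: {v for v in nodes if u not in reach(v)} for u in nodes}
--     dom[entry] = {entry}
--     return dom
-- ===== Notes on version B (the rewrite author's own statement) =====
-- stated objective: alternative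
-- what changed: B abandons A's iterative dataflow fixpoint entirely and computes dominators by node removal: v dominates u exactly when u is unreachable from entry after deleting v, so B runs one reachability closure per node instead of repeated intersection passes over dominator sets.
import Mathlib
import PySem

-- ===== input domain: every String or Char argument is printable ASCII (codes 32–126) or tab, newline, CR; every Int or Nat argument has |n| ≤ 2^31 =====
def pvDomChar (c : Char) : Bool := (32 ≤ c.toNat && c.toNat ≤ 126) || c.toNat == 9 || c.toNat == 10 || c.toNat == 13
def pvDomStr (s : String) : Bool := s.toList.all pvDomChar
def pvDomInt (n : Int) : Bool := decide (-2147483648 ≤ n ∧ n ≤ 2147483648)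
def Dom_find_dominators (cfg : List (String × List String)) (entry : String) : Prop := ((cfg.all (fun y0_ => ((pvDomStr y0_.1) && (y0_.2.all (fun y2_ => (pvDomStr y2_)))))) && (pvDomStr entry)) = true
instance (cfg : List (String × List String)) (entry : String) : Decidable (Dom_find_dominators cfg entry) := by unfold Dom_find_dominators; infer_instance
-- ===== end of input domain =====

-- B replaces A's iterative dataflow fixpoint by a node-removal reachability algorithm:
-- v dominates u iff u is unreachable from entry once v is deleted (objective: alternative).
-- Python's iteration order over a set is NOT modelled (see PYSEM.md); both ports therefore
-- present each returned dominator set in sorted order — an order-insensitive rendering of the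
-- same set — so that equality of the two ports is well-defined.  Both Python loops terminate
-- on every input; the ports run them on a fuel counter proved large enough below.

-- ===== PORT A =====
-- preds = [p for p in cfg if node in cfg[p]]
def fdPreds (cfg : PySem.Dict String (List String)) (node : String) : List String :=
  cfg.keys.filter (fun p => (cfg.getD p []).contains node)

-- new_dom = {node} | set.intersection(*(dom[p] for p in preds))   (preds nonempty)
def fdNew (cfg : PySem.Dict String (List String)) (dom : PySem.Dict String (List String))
    (node : String) : List String :=
  match fdPreds cfg node with
  | [] => []
  | p0 :: rest =>
    PySem.Set.union (PySem.Set.ofList [node])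
      (rest.foldl (fun acc p => PySem.Set.inter acc (dom.getD p [])) (dom.getD p0 []))

-- the body of A's 'for node in cfg' loop; state = (dom, changed)
def fdStepA (cfg : PySem.Dict String (List String)) (entry : String)
    (st : PySem.Dict String (List String) × Bool) (node : String) :
    PySem.Dict String (List String) × Bool :=
  if node == entry then st
  else
    match fdPreds cfg node with
    | [] => st
    | _ :: _ =>
      let new_dom := fdNew cfg st.1 node
      if PySem.Set.equal new_dom (st.1.getD node []) then st
      else (st.1.insert node new_dom, true)

-- while changed: one full pass per fuel step (fuel is proved sufficient below)
def fdLoopA (cfg : PySem.Dict String (List String)) (entry : String) :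
    Nat → PySem.Dict String (List String) → PySem.Dict String (List String)
  | 0, dom => dom
  | n + 1, dom =>
      let st := cfg.keys.foldl (fdStepA cfg entry) (dom, false)
      if st.2 then fdLoopA cfg entry n st.1 else st.1

def find_dominators (cfg : List (String × List String)) (entry : String) : List (String × List String) :=
  let c := PySem.Dict.ofList cfg
  -- dom = {v: set(cfg.keys()) for v in cfg}; dom[entry] = {entry}
  let dom0 := c.keys.foldl (fun d v => d.insert v (PySem.Set.ofList c.keys)) PySem.Dict.empty
  let dom1 := dom0.insert entry (PySem.Set.ofList [entry])
  let dF := fdLoopA c entry ((c.keys.length + 1) * (c.keys.length + 1) + 1) dom1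
  -- return dom   (each set rendered in sorted order; Python's set order is not modelled)
  dF.items.map (fun kv => (kv.1, PySem.List.sorted kv.2 (fun x => x) false))

-- ===== PORT B =====
-- new = {s for p in seen if p in cfg for s in cfg[p] if s != avoid and s not in seen}
def rStep (cfg : PySem.Dict String (List String)) (avoid : String) (seen : List String) :
    List String :=
  seen.foldl (fun acc p =>
      if cfg.contains p then
        (cfg.getD p []).foldl (fun acc2 s =>
            if s != avoid && !(PySem.Set.contains seen s) then PySem.Set.add acc2 s else acc2) acc
      else acc)
    PySem.Set.empty

-- while True: …  (fuel is proved sufficient below)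
def rLoop (cfg : PySem.Dict String (List String)) (avoid : String) :
    Nat → List String → List String
  | 0, seen => seen
  | n + 1, seen =>
      let nw := rStep cfg avoid seen
      if nw.isEmpty then seen else rLoop cfg avoid n (PySem.Set.union seen nw)

-- reach(avoid): nodes reachable from entry without ever touching avoid
def fdReach (cfg : PySem.Dict String (List String)) (entry avoid : String) : List String :=
  let seen0 := PySem.Set.diff (PySem.Set.ofList [entry]) [avoid]
  rLoop cfg avoid (cfg.items.foldl (fun a kv => a + kv.2.length) 0 + 2) seen0

def find_dominators_alt (cfg : List (String × List String)) (entry : String) : List (String × List String) :=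
  let c := PySem.Dict.ofList cfg
  let nodes := c.keys
  -- rs = {v: reach(v) for v in nodes}
  let rs := nodes.foldl (fun d v => d.insert v (fdReach c entry v)) PySem.Dict.empty
  -- dom = {u: {v for v in nodes if u not in rs[v]} for u in nodes}
  let dB := nodes.foldl (fun d u =>
      d.insert u (PySem.Set.ofList
        (nodes.filter (fun v => !(PySem.Set.contains (rs.getD v []) u))))) PySem.Dict.empty
  -- dom[entry] = {entry}
  let dB2 := dB.insert entry (PySem.Set.ofList [entry])
  dB2.items.map (fun kv => (kv.1, PySem.List.sorted kv.2 (fun x => x) false))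

-- ===== PRECONDITION & SPEC =====
def Spec_find_dominators (cfg : List (String × List String)) (entry : String) (out : List (String × List String)) : Prop := out = find_dominators_alt cfg entry
instance (cfg : List (String × List String)) (entry : String) (out : List (String × List String)) : Decidable (Spec_find_dominators cfg entry out) := by unfold Spec_find_dominators; infer_instance

-- ===== CLAIM =====
def Claim_equal_find_dominators : Prop := ∀ (cfg : List (String × List String)) (entry : String), Dom_find_dominators cfg entry → Spec_find_dominators cfg entry (find_dominators cfg entry)

-- ===== LEMMAS AND PROOFS =====

-- nodup + subset length comparisons
theorem pvLenLe (l1 l2 : List String) (h1 : l1.Nodup) (hs : ∀ x ∈ l1, x ∈ l2) :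
    l1.length ≤ l2.length := by
  calc l1.length = l1.toFinset.card := (List.toFinset_card_of_nodup h1).symm
  _ ≤ l2.toFinset.card := Finset.card_le_card (fun x hx => by
      simp only [List.mem_toFinset] at *; exact hs _ hx)
  _ ≤ l2.length := l2.toFinset_card_le

theorem pvLenLt (l1 l2 : List String) (h1 : l1.Nodup) (h2 : l2.Nodup)
    (hsub : ∀ x ∈ l1, x ∈ l2) (hne : PySem.Set.equal l1 l2 = false) :
    l1.length < l2.length := by
  have hss : l1.toFinset ⊂ l2.toFinset := by
    constructor
    · intro x hx; simp only [List.mem_toFinset] at *; exact hsub _ hx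
    · intro hc
      have : PySem.Set.equal l1 l2 = true := by
        rw [PySem.Set.equal_iff]
        intro x
        constructor
        · exact hsub x
        · intro hx
          have := hc (by simpa [List.mem_toFinset] using hx)
          simpa [List.mem_toFinset] using this
      simp [this] at hne
  calc l1.length = l1.toFinset.card := (List.toFinset_card_of_nodup h1).symm
  _ < l2.toFinset.card := Finset.card_lt_card hss
  _ = l2.length := List.toFinset_card_of_nodup h2

theorem pvSumLe (l : List String) (f : String → Nat) (b : Nat) (h : ∀ x ∈ l, f x ≤ b) :
    (l.map f).sum ≤ l.length * b := by
  induction l with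
  | nil => simp
  | cons a t ih =>
    simp only [List.map_cons, List.sum_cons, List.length_cons]
    have := ih (fun x hx => h x (List.mem_cons_of_mem _ hx))
    have ha := h a (by simp)
    calc f a + (t.map f).sum ≤ b + t.length * b := Nat.add_le_add ha this
    _ = (t.length + 1) * b := by ring

theorem pvSumLt (f g : String → Nat) (k : String) (hlt : g k < f k) :
    ∀ (l : List String), l.Nodup → k ∈ l → (∀ x ∈ l, x ≠ k → g x = f x) →
      (l.map g).sum < (l.map f).sum := by
  intro l
  induction l with
  | nil => intro _ hk; simp at hk
  | cons a t ih =>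
    intro hnd hk he
    simp only [List.map_cons, List.sum_cons]
    rcases List.mem_cons.mp hk with rfl | h
    · have heq : t.map g = t.map f := List.map_congr_left (fun x hx =>
        he x (List.mem_cons_of_mem _ hx) (fun hxa => (List.nodup_cons.mp hnd).1 (hxa ▸ hx)))
      rw [heq]
      exact Nat.add_lt_add_right hlt _
    · have hka : a ≠ k := fun hak => (List.nodup_cons.mp hnd).1 (hak ▸ h)
      have := ih (List.nodup_cons.mp hnd).2 h (fun x hx hxk => he x (List.mem_cons_of_mem _ hx) hxk)
      rw [he a (by simp) hka]
      omega

-- {x for x in l if g x} built by conditional add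
theorem pvMemFoldAddIf (l : List String) (g : String → Bool) (a : PySem.Set String) (x : String) :
    x ∈ l.foldl (fun acc s => if g s then PySem.Set.add acc s else acc) a ↔
      x ∈ a ∨ (x ∈ l ∧ g x = true) := by
  induction l generalizing a with
  | nil => simp
  | cons s t ih =>
    simp only [List.foldl_cons]
    rw [ih]
    by_cases hg : g s = true
    · rw [if_pos hg, PySem.Set.mem_add]
      constructor
      · rintro (⟨h | h⟩ | ⟨h1, h2⟩)
        · exact Or.inl h
        · exact Or.inr ⟨by simp [h], h ▸ hg⟩
        · exact Or.inr ⟨List.mem_cons_of_mem _ h1, h2⟩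
      · rintro (h | ⟨h1, h2⟩)
        · exact Or.inl (Or.inl h)
        · rcases List.mem_cons.mp h1 with h | h
          · exact Or.inl (Or.inr h)
          · exact Or.inr ⟨h, h2⟩
    · rw [if_neg hg]
      constructor
      · rintro (h | ⟨h1, h2⟩)
        · exact Or.inl h
        · exact Or.inr ⟨List.mem_cons_of_mem _ h1, h2⟩
      · rintro (h | ⟨h1, h2⟩)
        · exact Or.inl h
        · rcases List.mem_cons.mp h1 with h | h
          · exact absurd (h ▸ h2) hg
          · exact Or.inr ⟨h, h2⟩

-- chained set.intersection membership
theorem pvMemFoldInter (l : List String) (d : PySem.Dict String (List String))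
    (acc : PySem.Set String) (x : String) :
    x ∈ l.foldl (fun acc p => PySem.Set.inter acc (d.getD p [])) acc ↔
      x ∈ acc ∧ ∀ p ∈ l, x ∈ d.getD p [] := by
  induction l generalizing acc with
  | nil => simp
  | cons p t ih =>
    simp only [List.foldl_cons]
    rw [ih, PySem.Set.mem_inter]
    constructor
    · rintro ⟨⟨h1, h2⟩, h3⟩
      refine ⟨h1, fun q hq => ?_⟩
      rcases List.mem_cons.mp hq with h | h
      · exact h ▸ h2
      · exact h3 q h
    · rintro ⟨h1, h2⟩
      exact ⟨⟨h1, h2 p (by simp)⟩, fun q hq => h2 q (List.mem_cons_of_mem _ hq)⟩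

-- {v: g(v) for v in l} lookups
theorem pvGetDFoldInsert (l : List String) (hnd : l.Nodup) (g : String → List String)
    (d : PySem.Dict String (List String)) (u : String) :
    (l.foldl (fun d v => d.insert v (g v)) d).getD u [] =
      if u ∈ l then g u else d.getD u [] := by
  induction l generalizing d with
  | nil => simp
  | cons a t ih =>
    simp only [List.foldl_cons]
    rw [ih (List.nodup_cons.mp hnd).2]
    by_cases hu : u ∈ t
    · rw [if_pos hu, if_pos (List.mem_cons_of_mem _ hu)]
    · rw [if_neg hu, PySem.Dict.getD_insert]
      by_cases hua : u = a
      · subst hua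
        rw [if_pos rfl, if_pos (by simp)]
      · rw [if_neg hua, if_neg (by simp [hua, hu])]

-- ===== reach-side lemmas =====

theorem pvRGuard (v : String) (seen : List String) (y : String) :
    ((y != v && !(PySem.Set.contains seen y)) = true) ↔ (y ≠ v ∧ y ∉ seen) := by
  constructor
  · intro h
    rw [Bool.and_eq_true, bne_iff_ne] at h
    refine ⟨h.1, fun hm => ?_⟩
    rw [(PySem.Set.contains_iff seen y).mpr hm] at h
    simp at h
  · rintro ⟨h1, h2⟩
    rw [Bool.and_eq_true, bne_iff_ne]
    refine ⟨h1, ?_⟩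
    cases hc : PySem.Set.contains seen y
    · rfl
    · exact absurd ((PySem.Set.contains_iff seen y).mp hc) h2

theorem pvMemRStepAux (c : PySem.Dict String (List String)) (v : String) (seen : List String)
    (x : String) :
    ∀ (l : List String) (acc : PySem.Set String),
      x ∈ l.foldl (fun acc p =>
          if c.contains p then
            (c.getD p []).foldl (fun acc2 s =>
                if s != v && !(PySem.Set.contains seen s) then PySem.Set.add acc2 s else acc2) acc
          else acc) acc ↔
        x ∈ acc ∨ ∃ p ∈ l, c.contains p = true ∧ x ∈ c.getD p [] ∧ x ≠ v ∧ x ∉ seen := by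
  intro l
  induction l with
  | nil => intro acc; simp
  | cons p t ih =>
    intro acc
    simp only [List.foldl_cons]
    by_cases hc : c.contains p = true
    · rw [if_pos hc, ih, pvMemFoldAddIf]
      constructor
      · rintro ((h | ⟨h1, h2⟩) | ⟨q, hq, h⟩)
        · exact Or.inl h
        · exact Or.inr ⟨p, by simp, hc, h1, (pvRGuard v seen x).mp h2⟩
        · exact Or.inr ⟨q, List.mem_cons_of_mem _ hq, h⟩
      · rintro (h | ⟨q, hq, h1, h2, h3⟩)
        · exact Or.inl (Or.inl h)
        · rcases List.mem_cons.mp hq with rfl | hq'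
          · exact Or.inl (Or.inr ⟨h2, (pvRGuard v seen x).mpr h3⟩)
          · exact Or.inr ⟨q, hq', h1, h2, h3⟩
    · rw [if_neg hc, ih]
      constructor
      · rintro (h | ⟨q, hq, h⟩)
        · exact Or.inl h
        · exact Or.inr ⟨q, List.mem_cons_of_mem _ hq, h⟩
      · rintro (h | ⟨q, hq, h1, h2, h3⟩)
        · exact Or.inl h
        · rcases List.mem_cons.mp hq with rfl | hq'
          · exact absurd h1 hc
          · exact Or.inr ⟨q, hq', h1, h2, h3⟩

theorem pvMemRStep (c : PySem.Dict String (List String)) (v : String) (seen : List String)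
    (x : String) :
    x ∈ rStep c v seen ↔
      ∃ p ∈ seen, c.contains p = true ∧ x ∈ c.getD p [] ∧ x ≠ v ∧ x ∉ seen := by
  unfold rStep
  rw [pvMemRStepAux c v seen x seen PySem.Set.empty]
  simp [PySem.Set.empty]

theorem pvRLoopPres (c : PySem.Dict String (List String)) (v : String) (P : String → Prop)
    (hstep : ∀ seen x, (∀ y ∈ seen, P y) → x ∈ rStep c v seen → P x) :
    ∀ n seen, (∀ y ∈ seen, P y) → ∀ x ∈ rLoop c v n seen, P x := by
  intro n
  induction n with
  | zero => intro seen h x hx; exact h x hx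
  | succ n ih =>
    intro seen h x hx
    simp only [rLoop] at hx
    split at hx
    · exact h x hx
    · refine ih _ ?_ x hx
      intro y hy
      rcases (PySem.Set.mem_union seen _ y).mp hy with h1 | h1
      · exact h y h1
      · exact hstep seen y h h1

theorem pvRLoopSubset (c : PySem.Dict String (List String)) (v : String) :
    ∀ n seen, ∀ x ∈ seen, x ∈ rLoop c v n seen := by
  intro n
  induction n with
  | zero => intro seen x hx; exact hx
  | succ n ih =>
    intro seen x hx
    simp only [rLoop]
    split
    · exact hx
    · exact ih _ x ((PySem.Set.mem_union seen _ x).mpr (Or.inl hx))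

-- closedness of a reach set: no edge leads out of it (except into avoid)
def pvRClosed (c : PySem.Dict String (List String)) (v : String) (r : List String) : Prop :=
  ∀ p ∈ r, c.contains p = true → ∀ s ∈ c.getD p [], s ≠ v → s ∈ r

theorem pvRClosedOfEmpty (c : PySem.Dict String (List String)) (v : String) (r : List String)
    (h : rStep c v r = []) : pvRClosed c v r := by
  intro p hp hc s hs hsv
  by_cases hsr : s ∈ r
  · exact hsr
  · exfalso
    have : s ∈ rStep c v r := (pvMemRStep c v r s).mpr ⟨p, hp, hc, hs, hsv, hsr⟩
    rw [h] at this
    simp at this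

theorem pvRLoopClosed (c : PySem.Dict String (List String)) (v : String) (cap : List String)
    (hcapc : ∀ p x, c.contains p = true → x ∈ c.getD p [] → x ∈ cap) :
    ∀ n seen, seen.Nodup → (∀ x ∈ seen, x ∈ cap) → cap.length + 1 ≤ n + seen.length →
      pvRClosed c v (rLoop c v n seen) := by
  intro n
  induction n with
  | zero =>
    intro seen hnd hsub hle
    exfalso
    have := pvLenLe seen cap hnd hsub
    omega
  | succ n ih =>
    intro seen hnd hsub hle
    simp only [rLoop]
    by_cases hemp : (rStep c v seen).isEmpty = true
    · rw [if_pos hemp]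
      exact pvRClosedOfEmpty c v seen (List.isEmpty_iff.mp hemp)
    · rw [if_neg hemp]
      have hne0 : rStep c v seen ≠ [] := fun h => hemp (by simp [h])
      obtain ⟨x, hx⟩ := List.exists_mem_of_ne_nil _ hne0
      obtain ⟨_, _, _, _, _, hxs⟩ := (pvMemRStep c v seen x).mp hx
      have hnd' : (PySem.Set.union seen (rStep c v seen)).Nodup :=
        PySem.Set.nodup_union _ _ hnd
      have hsub' : ∀ y ∈ PySem.Set.union seen (rStep c v seen), y ∈ cap := by
        intro y hy
        rcases (PySem.Set.mem_union seen _ y).mp hy with h | h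
        · exact hsub y h
        · obtain ⟨p, _, hcp, hyp, _, _⟩ := (pvMemRStep c v seen y).mp h
          exact hcapc p y hcp hyp
      have hgrow : seen.length < (PySem.Set.union seen (rStep c v seen)).length := by
        have h1 : ∀ y ∈ seen, y ∈ PySem.Set.union seen (rStep c v seen) :=
          fun y hy => (PySem.Set.mem_union seen _ y).mpr (Or.inl hy)
        have hne : PySem.Set.equal seen (PySem.Set.union seen (rStep c v seen)) = false := by
          rw [Bool.eq_false_iff]
          intro hq
          have := (PySem.Set.equal_iff _ _).mp hq x
          exact hxs (this.mpr ((PySem.Set.mem_union seen _ x).mpr (Or.inr hx)))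
        exact pvLenLt seen _ hnd hnd' h1 hne
      exact ih _ hnd' hsub' (by omega)

-- reach facts used by the equivalence
theorem pvSumSucc (l : List (String × List String)) :
    ∀ (a : Nat), l.foldl (fun a kv => a + kv.2.length) a = a + (l.flatMap (fun kv => kv.2)).length := by
  induction l with
  | nil => intro a; simp
  | cons kv t ih =>
    intro a
    simp only [List.foldl_cons, List.flatMap_cons, List.length_append]
    rw [ih]
    omega

theorem pvReachClosed (c : PySem.Dict String (List String)) (entry v : String) :
    pvRClosed c v (fdReach c entry v) := by
  unfold fdReach
  apply pvRLoopClosed c v (entry :: c.items.flatMap (fun kv => kv.2))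
  · intro p x hcp hx
    have hiso : (c.get? p).isSome := by rw [← PySem.Dict.contains_eq_isSome_get?]; exact hcp
    obtain ⟨val, hval⟩ := Option.isSome_iff_exists.mp hiso
    have hgd : c.getD p [] = val := PySem.Dict.getD_of_get?_eq_some c [] hval
    have hmem : (p, val) ∈ c.items := PySem.Dict.mem_items_of_get?_eq_some c hval
    exact List.mem_cons_of_mem _ (List.mem_flatMap.mpr ⟨(p, val), hmem, hgd ▸ hx⟩)
  · exact PySem.Set.nodup_diff _ _ (PySem.Set.nodup_ofList _)
  · intro x hxm
    have := (PySem.Set.mem_diff _ _ x).mp hxm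
    have hx : x = entry := by simpa using this.1
    simp [hx]
  · rw [pvSumSucc]
    simp only [List.length_cons]
    omega

theorem pvReachEntry (c : PySem.Dict String (List String)) (entry v : String)
    (h : v ≠ entry) : entry ∈ fdReach c entry v := by
  unfold fdReach
  apply pvRLoopSubset
  rw [PySem.Set.mem_diff]
  constructor
  · simp
  · intro hm
    exact h (List.mem_singleton.mp hm).symm

theorem pvReachGrow (c : PySem.Dict String (List String)) (entry v : String)
    (P : String → Prop)
    (hstep : ∀ seen x, (∀ y ∈ seen, P y) → x ∈ rStep c v seen → P x)
    (hentry : v ≠ entry → P entry) :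
    ∀ x ∈ fdReach c entry v, P x := by
  intro x hx
  refine pvRLoopPres c v P hstep _ _ ?_ x hx
  intro y hy
  rw [PySem.Set.mem_diff] at hy
  have h1 : y = entry := by simpa using hy.1
  have h2 : v ≠ entry := by
    intro hv; exact hy.2 (by simp [h1, hv])
  exact h1 ▸ hentry h2

-- ===== A-side lemmas =====

theorem pvMemFdNew (c : PySem.Dict String (List String)) (d : PySem.Dict String (List String))
    (u x : String) (h : fdPreds c u ≠ []) :
    x ∈ fdNew c d u ↔ x = u ∨ ∀ p ∈ fdPreds c u, x ∈ d.getD p [] := by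
  unfold fdNew
  rcases hp : fdPreds c u with _ | ⟨p0, rest⟩
  · exact absurd hp h
  · rw [PySem.Set.mem_union, PySem.Set.mem_ofList, pvMemFoldInter]
    constructor
    · rintro (h1 | ⟨h1, h2⟩)
      · exact Or.inl (List.mem_singleton.mp h1)
      · refine Or.inr (fun p hpm => ?_)
        rcases List.mem_cons.mp hpm with rfl | hpm'
        · exact h1
        · exact h2 p hpm'
    · rintro (rfl | h1)
      · exact Or.inl (List.mem_singleton.mpr rfl)
      · exact Or.inr ⟨h1 p0 (by simp), fun p hpm => h1 p (List.mem_cons_of_mem _ hpm)⟩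

theorem pvNodupFdNew (c d : PySem.Dict String (List String)) (u : String) :
    (fdNew c d u).Nodup := by
  unfold fdNew
  split
  · simp
  · exact PySem.Set.nodup_union _ _ (PySem.Set.nodup_ofList _)

theorem pvFdNewMono (c d d' : PySem.Dict String (List String)) (u : String)
    (h : ∀ p x, x ∈ d'.getD p [] → x ∈ d.getD p []) :
    ∀ x ∈ fdNew c d' u, x ∈ fdNew c d u := by
  intro x hx
  by_cases hp : fdPreds c u = []
  · unfold fdNew at hx ⊢
    rw [hp] at hx ⊢
    exact hx
  · rw [pvMemFdNew c d' u x hp] at hx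
    rw [pvMemFdNew c d u x hp]
    rcases hx with h1 | h1
    · exact Or.inl h1
    · exact Or.inr (fun p hpmem => h p x (h1 p hpmem))

-- the invariant carried through A's loop
def pvAInv (c : PySem.Dict String (List String)) (entry : String)
    (d : PySem.Dict String (List String)) : Prop :=
  d.keys = PySem.Set.add c.keys entry ∧
  (∀ u, (d.getD u []).Nodup) ∧
  (∀ u x, u ≠ entry → x ∈ d.getD u [] → x ∈ c.keys) ∧
  d.getD entry [] = [entry] ∧
  (∀ u, u ∈ c.keys → u ≠ entry → fdPreds c u ≠ [] → ∀ x ∈ fdNew c d u, x ∈ d.getD u [])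

def fdMeasure (d : PySem.Dict String (List String)) : Nat :=
  (d.keys.map (fun k => (d.getD k []).length)).sum

theorem pvStepCases (c : PySem.Dict String (List String)) (entry : String)
    (st : PySem.Dict String (List String) × Bool) (u : String) :
    fdStepA c entry st u = st ∨
      (u ≠ entry ∧ fdPreds c u ≠ [] ∧
        PySem.Set.equal (fdNew c st.1 u) (st.1.getD u []) = false ∧
        fdStepA c entry st u = (st.1.insert u (fdNew c st.1 u), true)) := by
  unfold fdStepA
  by_cases he : (u == entry) = true
  · rw [if_pos he]; exact Or.inl rfl
  · rw [if_neg he]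
    cases hp : fdPreds c u with
    | nil => exact Or.inl rfl
    | cons p0 rest =>
      simp only
      by_cases heq : PySem.Set.equal (fdNew c st.1 u) (st.1.getD u []) = true
      · rw [if_pos heq]; exact Or.inl rfl
      · rw [if_neg heq]
        exact Or.inr ⟨by simpa using he, by simp, Bool.eq_false_iff.mpr heq, rfl⟩

theorem pvStepAInv (c : PySem.Dict String (List String)) (entry : String)
    (st : PySem.Dict String (List String) × Bool) (u : String) (hu : u ∈ c.keys)
    (hinv : pvAInv c entry st.1) : pvAInv c entry (fdStepA c entry st u).1 := by
  rcases pvStepCases c entry st u with hc | ⟨hue, hp, hne, hc⟩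
  · rw [hc]; exact hinv
  · rw [hc]
    obtain ⟨hk, hnd, hsubK, hent, hpre⟩ := hinv
    have hcont : st.1.contains u = true :=
      (PySem.Dict.contains_iff_mem_keys st.1 u).mpr
        (hk ▸ (PySem.Set.mem_add c.keys entry u).mpr (Or.inl hu))
    have hmono : ∀ p y, y ∈ (st.1.insert u (fdNew c st.1 u)).getD p [] → y ∈ st.1.getD p [] := by
      intro p y hy
      rw [PySem.Dict.getD_insert] at hy
      by_cases hpu : p = u
      · rw [if_pos hpu] at hy
        exact hpu ▸ hpre u hu hue hp y hy
      · rwa [if_neg hpu] at hy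
    refine ⟨?_, ?_, ?_, ?_, ?_⟩
    · rw [PySem.Dict.keys_insert_of_contains st.1 _ hcont, hk]
    · intro w
      rw [PySem.Dict.getD_insert]
      by_cases hwu : w = u
      · rw [if_pos hwu]; exact pvNodupFdNew c st.1 u
      · rw [if_neg hwu]; exact hnd w
    · intro w x hwe hxm
      rw [PySem.Dict.getD_insert] at hxm
      by_cases hwu : w = u
      · rw [if_pos hwu] at hxm
        rw [pvMemFdNew c st.1 u x hp] at hxm
        rcases hxm with rfl | hall
        · exact hu
        · rcases hpl : fdPreds c u with _ | ⟨p0, r⟩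
          · exact absurd hpl hp
          · have hp0 : p0 ∈ fdPreds c u := by rw [hpl]; simp
            have hx0 : x ∈ st.1.getD p0 [] := hall p0 hp0
            have hp0K : p0 ∈ c.keys := (List.mem_filter.mp hp0).1
            by_cases hp0e : p0 = entry
            · rw [hp0e, hent] at hx0
              exact (List.mem_singleton.mp hx0) ▸ (hp0e ▸ hp0K)
            · exact hsubK p0 x hp0e hx0
      · rw [if_neg hwu] at hxm
        exact hsubK w x hwe hxm
    · rw [PySem.Dict.getD_insert, if_neg (fun h => hue h.symm)]
      exact hent
    · intro w hwK hwe hwp x hx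
      have hx' : x ∈ fdNew c st.1 w := pvFdNewMono c st.1 _ w hmono x hx
      rw [PySem.Dict.getD_insert]
      by_cases hwu : w = u
      · rw [if_pos hwu]
        exact hwu ▸ hx'
      · rw [if_neg hwu]
        exact hpre w hwK hwe hwp x hx' 

theorem pvStepMeasure (c : PySem.Dict String (List String)) (entry : String)
    (hK : c.keys.Nodup)
    (st : PySem.Dict String (List String) × Bool) (u : String) (hu : u ∈ c.keys)
    (hinv : pvAInv c entry st.1) :
    fdStepA c entry st u = st ∨
      (fdMeasure (fdStepA c entry st u).1 < fdMeasure st.1 ∧ (fdStepA c entry st u).2 = true) := by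
  rcases pvStepCases c entry st u with hc | ⟨hue, hp, hne, hc⟩
  · exact Or.inl hc
  · right
    rw [hc]
    obtain ⟨hk, hnd, _, _, hpre⟩ := hinv
    have hKnd : st.1.keys.Nodup := hk ▸ PySem.Set.nodup_add c.keys entry hK
    have huk : u ∈ st.1.keys := hk ▸ (PySem.Set.mem_add c.keys entry u).mpr (Or.inl hu)
    have hcont : st.1.contains u = true := (PySem.Dict.contains_iff_mem_keys st.1 u).mpr huk
    have hlen : (fdNew c st.1 u).length < (st.1.getD u []).length :=
      pvLenLt _ _ (pvNodupFdNew c st.1 u) (hnd u) (hpre u hu hue hp) hne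
    refine ⟨?_, rfl⟩
    unfold fdMeasure
    rw [PySem.Dict.keys_insert_of_contains st.1 _ hcont]
    refine pvSumLt _ _ u ?_ st.1.keys hKnd huk ?_
    · rw [PySem.Dict.getD_insert, if_pos rfl]
      exact hlen
    · intro x hxm hxu
      rw [PySem.Dict.getD_insert, if_neg hxu]

theorem pvFoldPres (c : PySem.Dict String (List String)) (entry : String)
    (Q : PySem.Dict String (List String) → Prop)
    (hQ : ∀ st u, u ∈ c.keys → Q st.1 → Q (fdStepA c entry st u).1) :
    ∀ (l : List String), (∀ u ∈ l, u ∈ c.keys) →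
      ∀ st, Q st.1 → Q (l.foldl (fdStepA c entry) st).1 := by
  intro l
  induction l with
  | nil => intro _ st h; exact h
  | cons a t ih =>
    intro hl st h
    simp only [List.foldl_cons]
    exact ih (fun u hu => hl u (List.mem_cons_of_mem _ hu)) _ (hQ st a (hl a (by simp)) h)

theorem pvFlagMono (c : PySem.Dict String (List String)) (entry : String) :
    ∀ (l : List String) (st : PySem.Dict String (List String) × Bool), st.2 = true →
      (l.foldl (fdStepA c entry) st).2 = true := by
  intro l
  induction l with
  | nil => intro st h; exact h
  | cons a t ih =>
    intro st h
    simp only [List.foldl_cons]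
    rcases pvStepCases c entry st a with hc | ⟨_, _, _, hc⟩
    · rw [hc]; exact ih st h
    · rw [hc]; exact ih _ rfl

theorem pvFoldFalse (c : PySem.Dict String (List String)) (entry : String) :
    ∀ (l : List String) (d : PySem.Dict String (List String)),
      (l.foldl (fdStepA c entry) (d, false)).2 = false →
      l.foldl (fdStepA c entry) (d, false) = (d, false) := by
  intro l
  induction l with
  | nil => intro d _; rfl
  | cons a t ih =>
    intro d h
    simp only [List.foldl_cons] at h ⊢
    rcases pvStepCases c entry (d, false) a with hc | ⟨_, _, _, hc⟩
    · rw [hc] at h ⊢; exact ih d h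
    · rw [hc] at h
      rw [pvFlagMono c entry t _ rfl] at h
      simp at h

theorem pvFoldGuard (c : PySem.Dict String (List String)) (entry : String) :
    ∀ (l : List String) (d : PySem.Dict String (List String)),
      l.foldl (fdStepA c entry) (d, false) = (d, false) →
      ∀ u ∈ l, u ≠ entry → fdPreds c u ≠ [] →
        PySem.Set.equal (fdNew c d u) (d.getD u []) = true := by
  intro l
  induction l with
  | nil => intro d _ u hu; simp at hu
  | cons a t ih =>
    intro d h u hu hue hp
    simp only [List.foldl_cons] at h
    have hstep : fdStepA c entry (d, false) a = (d, false) := by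
      rcases pvStepCases c entry (d, false) a with hc | ⟨_, _, _, hc⟩
      · exact hc
      · rw [hc] at h
        have := pvFlagMono c entry t _ (rfl : ((d.insert a (fdNew c d a), true) : _ × Bool).2 = true)
        rw [h] at this
        simp at this
    rcases List.mem_cons.mp hu with h1 | h1
    · subst h1
      unfold fdStepA at hstep
      rw [if_neg (by simpa using hue)] at hstep
      rcases hpc : fdPreds c u with _ | ⟨p0, rest⟩
      · exact absurd hpc hp
      · rw [hpc] at hstep
        simp only at hstep
        by_cases heq : PySem.Set.equal (fdNew c d u) (d.getD u []) = true
        · exact heq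
        · rw [if_neg heq] at hstep
          simp at hstep
    · rw [hstep] at h
      exact ih d h u h1 hue hp

-- the final state of A's while-loop is a stable point
def pvStable (c : PySem.Dict String (List String)) (entry : String)
    (d : PySem.Dict String (List String)) : Prop :=
  c.keys.foldl (fdStepA c entry) (d, false) = (d, false)

theorem pvFoldMeasure (c : PySem.Dict String (List String)) (entry : String)
    (hK : c.keys.Nodup) :
    ∀ (l : List String), (∀ u ∈ l, u ∈ c.keys) →
      ∀ st, pvAInv c entry st.1 →
        fdMeasure (l.foldl (fdStepA c entry) st).1 ≤ fdMeasure st.1 ∧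
        ((l.foldl (fdStepA c entry) st).2 = true →
          st.2 = true ∨ fdMeasure (l.foldl (fdStepA c entry) st).1 < fdMeasure st.1) := by
  intro l
  induction l with
  | nil => intro _ st _; exact ⟨le_refl _, fun h => Or.inl h⟩
  | cons a t ih =>
    intro hl st hinv
    simp only [List.foldl_cons]
    have ha := hl a (by simp)
    have hinv1 : pvAInv c entry (fdStepA c entry st a).1 := pvStepAInv c entry st a ha hinv
    have hrec := ih (fun u hu => hl u (List.mem_cons_of_mem _ hu)) (fdStepA c entry st a) hinv1
    rcases pvStepMeasure c entry hK st a ha hinv with heq | ⟨hlt, hflag⟩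
    · rw [heq] at hrec ⊢
      exact hrec
    · refine ⟨le_trans hrec.1 (Nat.le_of_lt hlt), fun _ => Or.inr (lt_of_le_of_lt hrec.1 hlt)⟩

theorem pvLoopFix (c : PySem.Dict String (List String)) (entry : String)
    (hK : c.keys.Nodup) :
    ∀ (n : Nat) (d : PySem.Dict String (List String)), pvAInv c entry d → fdMeasure d < n →
      pvAInv c entry (fdLoopA c entry n d) ∧ pvStable c entry (fdLoopA c entry n d) := by
  intro n
  induction n with
  | zero => intro d _ hm; omega
  | succ n ih =>
    intro d hinv hm
    simp only [fdLoopA]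
    have hinv' : pvAInv c entry (c.keys.foldl (fdStepA c entry) (d, false)).1 :=
      pvFoldPres c entry (pvAInv c entry)
        (fun st u hu h => pvStepAInv c entry st u hu h) c.keys (fun _ h => h) (d, false) hinv
    have hms := pvFoldMeasure c entry hK c.keys (fun _ h => h) (d, false) hinv
    by_cases hflag : (c.keys.foldl (fdStepA c entry) (d, false)).2 = true
    · rw [if_pos hflag]
      rcases hms.2 hflag with h | h
      · simp at h
      · have h' : fdMeasure (c.keys.foldl (fdStepA c entry) (d, false)).1 < fdMeasure d := by
          simpa using h
        exact ih _ hinv' (by omega)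
    · rw [if_neg hflag]
      have hst : c.keys.foldl (fdStepA c entry) (d, false) = (d, false) :=
        pvFoldFalse c entry c.keys d (Bool.not_eq_true _ ▸ (Bool.eq_false_iff.mpr hflag))
      rw [hst]
      exact ⟨hinv, hst⟩

theorem pvLoopPres (c : PySem.Dict String (List String)) (entry : String)
    (Q : PySem.Dict String (List String) → Prop)
    (hQ : ∀ st u, u ∈ c.keys → Q st.1 → Q (fdStepA c entry st u).1) :
    ∀ (n : Nat) (d : PySem.Dict String (List String)), Q d → Q (fdLoopA c entry n d) := by
  intro n
  induction n with
  | zero => intro d h; exact h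
  | succ n ih =>
    intro d h
    simp only [fdLoopA]
    split
    · exact ih _ (pvFoldPres c entry Q hQ c.keys (fun _ hu => hu) (d, false) h)
    · exact pvFoldPres c entry Q hQ c.keys (fun _ hu => hu) (d, false) h

-- ===== the two directions of the per-node characterisation =====

theorem pvAtoB (c : PySem.Dict String (List String)) (entry : String)
    (dF : PySem.Dict String (List String)) (hA : pvAInv c entry dF)
    (hS : pvStable c entry dF) (v x : String) (hx : x ∈ fdReach c entry v) :
    v ∉ dF.getD x [] := by
  obtain ⟨hk, hnd, hsubK, hent, hpre⟩ := hA
  refine pvReachGrow c entry v (fun y => v ∉ dF.getD y []) ?_ ?_ x hx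
  · intro seen y hP hy
    obtain ⟨p, hpseen, hcp, hyp, hyv, _⟩ := (pvMemRStep c v seen y).mp hy
    by_cases hye : y = entry
    · subst hye
      rw [hent]
      intro hm
      exact hyv (List.mem_singleton.mp hm).symm
    · by_cases hyK : y ∈ c.keys
      · have hpK : p ∈ c.keys := (PySem.Dict.contains_iff_mem_keys c p).mp hcp
        have hppred : p ∈ fdPreds c y :=
          List.mem_filter.mpr ⟨hpK, List.elem_eq_true_of_mem hyp⟩
        have hpne : fdPreds c y ≠ [] := List.ne_nil_of_mem hppred
        have hguard := pvFoldGuard c entry c.keys dF hS y hyK hye hpne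
        intro hvm
        have hvnew : v ∈ fdNew c dF y := ((PySem.Set.equal_iff _ _).mp hguard v).mpr hvm
        rw [pvMemFdNew c dF y v hpne] at hvnew
        rcases hvnew with rfl | hall
        · exact hyv rfl
        · exact hP p hpseen (hall p hppred)
      · have hcf : dF.contains y = false := by
          rw [Bool.eq_false_iff]
          intro hcy
          have := (PySem.Dict.contains_iff_mem_keys dF y).mp hcy
          rw [hk] at this
          rcases (PySem.Set.mem_add c.keys entry y).mp this with h | h
          · exact hyK h
          · exact hye h
        rw [PySem.Dict.getD_of_not_contains dF [] hcf]
        simp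
  · intro hven
    rw [hent]
    intro hm
    exact hven (List.mem_singleton.mp hm)

theorem pvBtoA (c : PySem.Dict String (List String)) (entry : String)
    (v : String) (n : Nat) (d0 : PySem.Dict String (List String))
    (hbase : ∀ u ∈ c.keys, u ∉ fdReach c entry v → v ∈ d0.getD u []) :
    ∀ u ∈ c.keys, u ∉ fdReach c entry v → v ∈ (fdLoopA c entry n d0).getD u [] := by
  refine pvLoopPres c entry
    (fun d => ∀ u ∈ c.keys, u ∉ fdReach c entry v → v ∈ d.getD u []) ?_ n d0 hbase
  intro st u' hu' hQ u huK hur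
  rcases pvStepCases c entry st u' with hc | ⟨hue, hp, _, hc⟩
  · rw [hc]; exact hQ u huK hur
  · rw [hc]
    simp only
    rw [PySem.Dict.getD_insert]
    by_cases huu : u = u'
    · rw [if_pos huu]
      subst huu
      rw [pvMemFdNew c st.1 u v hp]
      by_cases hvu : v = u
      · exact Or.inl hvu
      · refine Or.inr (fun p hpm => ?_)
        have hpK : p ∈ c.keys := (List.mem_filter.mp hpm).1
        have hsucc : u ∈ c.getD p [] := List.mem_of_elem_eq_true (List.mem_filter.mp hpm).2
        have hpr : p ∉ fdReach c entry v := by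
          intro hpR
          exact hur (pvReachClosed c entry v p hpR
            ((PySem.Dict.contains_iff_mem_keys c p).mpr hpK) u hsucc (fun h => hvu h.symm))
        exact hQ p hpK hpr
    · rw [if_neg huu]
      exact hQ u huK hur

-- the initial dict of A: dom = {v: set(cfg.keys()) for v in cfg}; dom[entry] = {entry}
def pvInitA (c : PySem.Dict String (List String)) (entry : String) :
    PySem.Dict String (List String) :=
  (c.keys.foldl (fun d v => d.insert v (PySem.Set.ofList c.keys)) PySem.Dict.empty).insert entry
    (PySem.Set.ofList [entry])

theorem pvKeysFold (c : PySem.Dict String (List String)) (hK : c.keys.Nodup)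
    (g : String → List String) :
    (c.keys.foldl (fun d v => d.insert v (g v)) PySem.Dict.empty).keys = c.keys := by
  rw [PySem.Dict.keys_foldl_insert c.keys (fun _ v => g v) PySem.Dict.empty,
    PySem.Dict.keys_empty, PySem.Set.update_nil_left, PySem.Set.ofList_eq_self_of_nodup _ hK]

theorem pvGetDInitA (c : PySem.Dict String (List String)) (entry : String) (hK : c.keys.Nodup)
    (u : String) :
    (pvInitA c entry).getD u [] =
      if u = entry then [entry] else if u ∈ c.keys then c.keys else [] := by
  unfold pvInitA
  rw [PySem.Dict.getD_insert]
  by_cases hue : u = entry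
  · rw [if_pos hue, if_pos hue]
    rfl
  · rw [if_neg hue, if_neg hue,
      pvGetDFoldInsert c.keys hK (fun _ => PySem.Set.ofList c.keys) _ u]
    by_cases hum : u ∈ c.keys
    · rw [if_pos hum, if_pos hum]
      exact PySem.Set.ofList_eq_self_of_nodup _ hK
    · rw [if_neg hum, if_neg hum]
      exact PySem.Dict.getD_empty u []

theorem pvKeysInitA (c : PySem.Dict String (List String)) (entry : String) (hK : c.keys.Nodup) :
    (pvInitA c entry).keys = PySem.Set.add c.keys entry := by
  unfold pvInitA
  have h0 := pvKeysFold c hK (fun _ => PySem.Set.ofList c.keys)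
  by_cases hc : entry ∈ c.keys
  · have hct : (c.keys.foldl (fun d v =>
        d.insert v (PySem.Set.ofList c.keys)) PySem.Dict.empty).contains entry = true :=
      (PySem.Dict.contains_iff_mem_keys _ _).mpr (by rw [h0]; exact hc)
    rw [PySem.Dict.keys_insert_of_contains _ _ hct, h0, PySem.Set.add_of_mem hc]
  · have hcf : (c.keys.foldl (fun d v =>
        d.insert v (PySem.Set.ofList c.keys)) PySem.Dict.empty).contains entry = false := by
      rw [Bool.eq_false_iff]
      intro hct
      exact hc (h0 ▸ (PySem.Dict.contains_iff_mem_keys _ _).mp hct)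
    rw [PySem.Dict.keys_insert_of_not_contains _ _ hcf, h0, PySem.Set.add_of_not_mem hc]

theorem pvAInvInitA (c : PySem.Dict String (List String)) (entry : String) (hK : c.keys.Nodup) :
    pvAInv c entry (pvInitA c entry) := by
  refine ⟨pvKeysInitA c entry hK, ?_, ?_, ?_, ?_⟩
  · intro u
    rw [pvGetDInitA c entry hK u]
    split
    · simp
    · split
      · exact hK
      · simp
  · intro u x hue hx
    rw [pvGetDInitA c entry hK u, if_neg hue] at hx
    split at hx
    · exact hx
    · simp at hx
  · rw [pvGetDInitA c entry hK entry, if_pos rfl]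
  · intro u huK hue hp x hx
    rw [pvGetDInitA c entry hK u, if_neg hue, if_pos huK]
    rw [pvMemFdNew c _ u x hp] at hx
    rcases hx with rfl | hall
    · exact huK
    · rcases hpl : fdPreds c u with _ | ⟨p0, r⟩
      · exact absurd hpl hp
      · have hp0 : p0 ∈ fdPreds c u := by rw [hpl]; simp
        have hx0 := hall p0 hp0
        have hp0K : p0 ∈ c.keys := (List.mem_filter.mp hp0).1
        rw [pvGetDInitA c entry hK p0] at hx0
        by_cases hp0e : p0 = entry
        · rw [if_pos hp0e] at hx0
          exact (List.mem_singleton.mp hx0) ▸ (hp0e ▸ hp0K)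
        · rw [if_neg hp0e, if_pos hp0K] at hx0
          exact hx0

theorem pvMeasInitA (c : PySem.Dict String (List String)) (entry : String) (hK : c.keys.Nodup) :
    fdMeasure (pvInitA c entry) < (c.keys.length + 1) * (c.keys.length + 1) + 1 := by
  unfold fdMeasure
  rw [pvKeysInitA c entry hK]
  have hsum : ((PySem.Set.add c.keys entry).map
      (fun k => ((pvInitA c entry).getD k []).length)).sum ≤
      (PySem.Set.add c.keys entry).length * (c.keys.length + 1) := by
    apply pvSumLe
    intro x _
    rw [pvGetDInitA c entry hK x]
    split
    · simp
    · split
      · simp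
      · simp
  have hlen : (PySem.Set.add c.keys entry).length ≤ c.keys.length + 1 := by
    by_cases hc : entry ∈ c.keys
    · rw [PySem.Set.add_of_mem hc]; omega
    · rw [PySem.Set.add_of_not_mem hc]; simp
  exact Nat.lt_succ_of_le (le_trans hsum (Nat.mul_le_mul_right _ hlen))

theorem pvMain (cfg : List (String × List String)) (entry : String) :
    find_dominators cfg entry = find_dominators_alt cfg entry := by
  have hK : (PySem.Dict.ofList cfg).keys.Nodup := PySem.Dict.nodup_keys_ofList cfg
  set c := PySem.Dict.ofList cfg with hc
  obtain ⟨hAF, hSF⟩ := pvLoopFix c entry hK ((c.keys.length + 1) * (c.keys.length + 1) + 1)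
    (pvInitA c entry) (pvAInvInitA c entry hK) (pvMeasInitA c entry hK)
  set dF := fdLoopA c entry ((c.keys.length + 1) * (c.keys.length + 1) + 1) (pvInitA c entry)
    with hdF
  have hkF := hAF.1
  have hndF := hAF.2.1
  have hsubKF := hAF.2.2.1
  have hentF := hAF.2.2.2.1
  set rs := c.keys.foldl (fun d v => d.insert v (fdReach c entry v)) PySem.Dict.empty with hrs
  have hrsget : ∀ v ∈ c.keys, rs.getD v [] = fdReach c entry v := by
    intro v hv
    rw [hrs, pvGetDFoldInsert c.keys hK (fun v => fdReach c entry v) _ v, if_pos hv]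
  set gB := fun u => PySem.Set.ofList
    (c.keys.filter (fun v => !(PySem.Set.contains (rs.getD v []) u))) with hgB
  set dB := c.keys.foldl (fun d u => d.insert u (gB u)) PySem.Dict.empty with hdB
  have hdBitems : dB.items = c.keys.map (fun u => (u, gB u)) := by
    have := PySem.Dict.items_foldl_insert_fresh c.keys (fun a => a) gB PySem.Dict.empty
      (fun a _ => PySem.Dict.contains_empty a) (by simpa using hK)
    simpa using this
  have hdBkeys : dB.keys = c.keys := pvKeysFold c hK gB
  have hval : ∀ k ∈ c.keys, k ≠ entry →
      PySem.List.sorted (dF.getD k []) (fun x => x) false =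
        PySem.List.sorted (gB k) (fun x => x) false := by
    intro k hkK hke
    apply PySem.List.sorted_eq_sorted_of_perm _ _ _ (fun a b h => h)
    refine (List.perm_ext_iff_of_nodup (hndF k)
      (by rw [hgB]; exact PySem.Set.nodup_ofList _)).mpr ?_
    intro x
    rw [hgB]
    simp only [PySem.Set.mem_ofList, List.mem_filter]
    constructor
    · intro hx
      have hxK : x ∈ c.keys := hsubKF k x hke hx
      refine ⟨hxK, ?_⟩
      rw [hrsget x hxK]
      have hkr : k ∉ fdReach c entry x := fun hr => (pvAtoB c entry dF hAF hSF x k hr) hx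
      cases hcs : PySem.Set.contains (fdReach c entry x) k
      · rfl
      · exact absurd ((PySem.Set.contains_iff _ _).mp hcs) hkr
    · intro hx
      obtain ⟨hxK, hb⟩ := hx
      have hkr : k ∉ fdReach c entry x := by
        intro hr
        rw [hrsget x hxK, (PySem.Set.contains_iff _ _).mpr hr] at hb
        simp at hb
      have hbase : ∀ u ∈ c.keys, u ∉ fdReach c entry x → x ∈ (pvInitA c entry).getD u [] := by
        intro u huK hur
        rw [pvGetDInitA c entry hK u]
        by_cases hue : u = entry
        · rw [if_pos hue]
          by_cases hxe : x = entry
          · simp [hxe]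
          · exact absurd (pvReachEntry c entry x hxe) (hue ▸ hur)
        · rw [if_neg hue, if_pos huK]
          exact hxK
      exact pvBtoA c entry x _ (pvInitA c entry) hbase k hkK hkr
  show dF.items.map (fun kv => (kv.1, PySem.List.sorted kv.2 (fun x => x) false)) =
    (dB.insert entry (PySem.Set.ofList [entry])).items.map
      (fun kv => (kv.1, PySem.List.sorted kv.2 (fun x => x) false))
  have hitemsF : dF.items = (PySem.Set.add c.keys entry).map (fun k => (k, dF.getD k [])) := by
    rw [PySem.Dict.items_eq_map_keys dF (by rw [hkF]; exact PySem.Set.nodup_add _ _ hK) [], hkF]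
  by_cases hentK : entry ∈ c.keys
  · have hcont : dB.contains entry = true :=
      (PySem.Dict.contains_iff_mem_keys dB entry).mpr (hdBkeys ▸ hentK)
    rw [hitemsF, PySem.Set.add_of_mem hentK,
      PySem.Dict.items_insert_of_contains dB _ hcont, hdBitems,
      List.map_map, List.map_map, List.map_map]
    apply List.map_congr_left
    intro k hkK
    simp only [Function.comp]
    by_cases hke : k = entry
    · subst hke
      rw [hentF]
      simp only [beq_self_eq_true, if_true]
      rfl
    · have hbeq : (k == entry) = false := beq_eq_false_iff_ne.mpr hke
      rw [hbeq]
      simp only [Bool.false_eq_true, if_false]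
      exact Prod.ext rfl (hval k hkK hke)
  · have hcontf : dB.contains entry = false := by
      rw [Bool.eq_false_iff]
      intro hct
      exact hentK (hdBkeys ▸ (PySem.Dict.contains_iff_mem_keys dB entry).mp hct)
    rw [hitemsF, PySem.Set.add_of_not_mem hentK,
      PySem.Dict.items_insert_of_not_contains dB _ hcontf, hdBitems]
    simp only [List.map_append, List.map_map]
    congr 1
    · apply List.map_congr_left
      intro k hkK
      simp only [Function.comp]
      exact Prod.ext rfl (hval k hkK (fun hke => hentK (hke ▸ hkK)))
    · simp only [List.map_cons, List.map_nil, Function.comp]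
      rw [hentF]
      rfl

-- ===== VERDICT =====
theorem find_dominators_spec : Claim_equal_find_dominators := by
  intro cfg entry _
  exact pvMain cfg entry
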